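-- pv_equiv track=rewrite | github.com/Johnnenna2/mean_reversion_gap_trading | daily_screener.py | get_sector_classification
-- ===== SOURCE A (Python) =====
-- def get_sector_classification(symbol):
--     """Classify symbols by sector"""
--     sectors = {
--         'Technology': ['AAPL', 'MSFT', 'GOOGL', 'AMZN', 'META', 'NVDA', 'AMD', 'INTC',
--                       'QCOM', 'AVGO', 'CRM', 'ORCL', 'ADBE', 'NOW', 'TEAM', 'SNOW', 'PLTR'],
--         'Financial': ['JPM', 'BAC', 'WFC', 'GS', 'MS', 'C', 'V', 'MA', 'BRK-B', 'AFRM', 'SOFI'],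
--         'Healthcare': ['JNJ', 'UNH', 'PFE', 'ABBV', 'TMO', 'ABT', 'MRK', 'GILD', 'BIIB', 'MRNA'],
--         'Consumer': ['WMT', 'HD', 'PG', 'KO', 'PEP', 'MCD', 'NKE', 'TGT', 'COST', 'SBUX'],
--         'Energy': ['XOM', 'CVX', 'COP', 'EOG', 'SLB', 'OXY'],
--         'Transportation': ['UBER', 'LYFT', 'ABNB', 'AAL', 'DAL', 'UAL'],
--         'EV/Clean': ['TSLA', 'F', 'GM', 'RIVN', 'NIO', 'ENPH', 'PLUG'],
--         'ETF': ['SPY', 'QQQ', 'IWM', 'XLF', 'XLE', 'XLK', 'XLV', 'XLI', 'XLU', 'XLP']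
--     }
--
--     for sector, symbols in sectors.items():
--         if symbol in symbols:
--             return sector
--     return 'Other'
-- ===== SOURCE B (Python) =====
-- # Flat precomputed symbol->sector table: one O(1) dict lookup instead of scanning each sector list.
-- _SECTOR_BY_SYMBOL = {
--     'AAPL': 'Technology',
--     'MSFT': 'Technology',
--     'GOOGL': 'Technology',
--     'AMZN': 'Technology',
--     'META': 'Technology',
--     'NVDA': 'Technology',
--     'AMD': 'Technology',
--     'INTC': 'Technology',
--     'QCOM': 'Technology',
--     'AVGO': 'Technology',
--     'CRM': 'Technology',
--     'ORCL': 'Technology',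
--     'ADBE': 'Technology',
--     'NOW': 'Technology',
--     'TEAM': 'Technology',
--     'SNOW': 'Technology',
--     'PLTR': 'Technology',
--     'JPM': 'Financial',
--     'BAC': 'Financial',
--     'WFC': 'Financial',
--     'GS': 'Financial',
--     'MS': 'Financial',
--     'C': 'Financial',
--     'V': 'Financial',
--     'MA': 'Financial',
--     'BRK-B': 'Financial',
--     'AFRM': 'Financial',
--     'SOFI': 'Financial',
--     'JNJ': 'Healthcare',
--     'UNH': 'Healthcare',
--     'PFE': 'Healthcare',
--     'ABBV': 'Healthcare',
--     'TMO': 'Healthcare',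
--     'ABT': 'Healthcare',
--     'MRK': 'Healthcare',
--     'GILD': 'Healthcare',
--     'BIIB': 'Healthcare',
--     'MRNA': 'Healthcare',
--     'WMT': 'Consumer',
--     'HD': 'Consumer',
--     'PG': 'Consumer',
--     'KO': 'Consumer',
--     'PEP': 'Consumer',
--     'MCD': 'Consumer',
--     'NKE': 'Consumer',
--     'TGT': 'Consumer',
--     'COST': 'Consumer',
--     'SBUX': 'Consumer',
--     'XOM': 'Energy',
--     'CVX': 'Energy',
--     'COP': 'Energy',
--     'EOG': 'Energy',
--     'SLB': 'Energy',
--     'OXY': 'Energy',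
--     'UBER': 'Transportation',
--     'LYFT': 'Transportation',
--     'ABNB': 'Transportation',
--     'AAL': 'Transportation',
--     'DAL': 'Transportation',
--     'UAL': 'Transportation',
--     'TSLA': 'EV/Clean',
--     'F': 'EV/Clean',
--     'GM': 'EV/Clean',
--     'RIVN': 'EV/Clean',
--     'NIO': 'EV/Clean',
--     'ENPH': 'EV/Clean',
--     'PLUG': 'EV/Clean',
--     'SPY': 'ETF',
--     'QQQ': 'ETF',
--     'IWM': 'ETF',
--     'XLF': 'ETF',
--     'XLE': 'ETF',
--     'XLK': 'ETF',
--     'XLV': 'ETF',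
--     'XLI': 'ETF',
--     'XLU': 'ETF',
--     'XLP': 'ETF',
-- }
--
--
-- def get_sector_classification(symbol):
--     """Classify symbols by sector"""
--     return _SECTOR_BY_SYMBOL.get(symbol, 'Other')
-- ===== Notes on version B (the rewrite author's own statement) =====
-- stated objective: idiomatic
-- what changed: Replaced the loop over sector lists with per-sector membership tests by a single precomputed flat symbol-to-sector dict and one lookup with the same default sector.
import Mathlib
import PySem

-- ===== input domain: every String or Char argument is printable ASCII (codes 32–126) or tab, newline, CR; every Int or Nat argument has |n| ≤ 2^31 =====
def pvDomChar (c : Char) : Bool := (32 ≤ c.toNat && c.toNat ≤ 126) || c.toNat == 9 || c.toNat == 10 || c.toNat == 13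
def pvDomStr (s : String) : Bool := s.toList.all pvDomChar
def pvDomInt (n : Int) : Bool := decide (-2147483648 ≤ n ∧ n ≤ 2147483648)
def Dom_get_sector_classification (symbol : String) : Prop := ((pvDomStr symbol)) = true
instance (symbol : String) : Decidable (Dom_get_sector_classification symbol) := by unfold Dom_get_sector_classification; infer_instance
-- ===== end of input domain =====

-- ===== PORT A =====
-- B replaces A's per-sector list scan with a single flat symbol→sector dict lookup (idiomatic).
def pvSectorsA : List (String × List String) := [
  ("Technology", ["AAPL", "MSFT", "GOOGL", "AMZN", "META", "NVDA", "AMD", "INTC", "QCOM", "AVGO", "CRM", "ORCL", "ADBE", "NOW", "TEAM", "SNOW", "PLTR"]),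
  ("Financial", ["JPM", "BAC", "WFC", "GS", "MS", "C", "V", "MA", "BRK-B", "AFRM", "SOFI"]),
  ("Healthcare", ["JNJ", "UNH", "PFE", "ABBV", "TMO", "ABT", "MRK", "GILD", "BIIB", "MRNA"]),
  ("Consumer", ["WMT", "HD", "PG", "KO", "PEP", "MCD", "NKE", "TGT", "COST", "SBUX"]),
  ("Energy", ["XOM", "CVX", "COP", "EOG", "SLB", "OXY"]),
  ("Transportation", ["UBER", "LYFT", "ABNB", "AAL", "DAL", "UAL"]),
  ("EV/Clean", ["TSLA", "F", "GM", "RIVN", "NIO", "ENPH", "PLUG"]),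
  ("ETF", ["SPY", "QQQ", "IWM", "XLF", "XLE", "XLK", "XLV", "XLI", "XLU", "XLP"])]
-- the for-loop over sectors.items() with early return, step for step
def pvFindSector (symbol : String) : List (String × List String) → String
  | [] => "Other"
  | (sector, symbols) :: rest =>
    if symbols.contains symbol then sector else pvFindSector symbol rest

def get_sector_classification (symbol : String) : String :=
  pvFindSector symbol pvSectorsA

-- ===== PORT B =====
def pvSectorTable : List (String × String) := [
  ("AAPL", "Technology"),
  ("MSFT", "Technology"),
  ("GOOGL", "Technology"),
  ("AMZN", "Technology"),
  ("META", "Technology"),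
  ("NVDA", "Technology"),
  ("AMD", "Technology"),
  ("INTC", "Technology"),
  ("QCOM", "Technology"),
  ("AVGO", "Technology"),
  ("CRM", "Technology"),
  ("ORCL", "Technology"),
  ("ADBE", "Technology"),
  ("NOW", "Technology"),
  ("TEAM", "Technology"),
  ("SNOW", "Technology"),
  ("PLTR", "Technology"),
  ("JPM", "Financial"),
  ("BAC", "Financial"),
  ("WFC", "Financial"),
  ("GS", "Financial"),
  ("MS", "Financial"),
  ("C", "Financial"),
  ("V", "Financial"),
  ("MA", "Financial"),
  ("BRK-B", "Financial"),
  ("AFRM", "Financial"),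
  ("SOFI", "Financial"),
  ("JNJ", "Healthcare"),
  ("UNH", "Healthcare"),
  ("PFE", "Healthcare"),
  ("ABBV", "Healthcare"),
  ("TMO", "Healthcare"),
  ("ABT", "Healthcare"),
  ("MRK", "Healthcare"),
  ("GILD", "Healthcare"),
  ("BIIB", "Healthcare"),
  ("MRNA", "Healthcare"),
  ("WMT", "Consumer"),
  ("HD", "Consumer"),
  ("PG", "Consumer"),
  ("KO", "Consumer"),
  ("PEP", "Consumer"),
  ("MCD", "Consumer"),
  ("NKE", "Consumer"),
  ("TGT", "Consumer"),
  ("COST", "Consumer"),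
  ("SBUX", "Consumer"),
  ("XOM", "Energy"),
  ("CVX", "Energy"),
  ("COP", "Energy"),
  ("EOG", "Energy"),
  ("SLB", "Energy"),
  ("OXY", "Energy"),
  ("UBER", "Transportation"),
  ("LYFT", "Transportation"),
  ("ABNB", "Transportation"),
  ("AAL", "Transportation"),
  ("DAL", "Transportation"),
  ("UAL", "Transportation"),
  ("TSLA", "EV/Clean"),
  ("F", "EV/Clean"),
  ("GM", "EV/Clean"),
  ("RIVN", "EV/Clean"),
  ("NIO", "EV/Clean"),
  ("ENPH", "EV/Clean"),
  ("PLUG", "EV/Clean"),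
  ("SPY", "ETF"),
  ("QQQ", "ETF"),
  ("IWM", "ETF"),
  ("XLF", "ETF"),
  ("XLE", "ETF"),
  ("XLK", "ETF"),
  ("XLV", "ETF"),
  ("XLI", "ETF"),
  ("XLU", "ETF"),
  ("XLP", "ETF")]

-- the Python dict literal, as a PySem.Dict over its (distinct-key) item list
def pvSectorDict : PySem.Dict String String := PySem.Dict.mk pvSectorTable

def get_sector_classification_alt (symbol : String) : String :=
  PySem.Dict.getD pvSectorDict symbol "Other"

-- ===== PRECONDITION & SPEC =====
def Spec_get_sector_classification (symbol : String) (out : String) : Prop := out = get_sector_classification_alt symbol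
instance (symbol : String) (out : String) : Decidable (Spec_get_sector_classification symbol out) := by unfold Spec_get_sector_classification; infer_instance

-- ===== CLAIM (what is proved, stated in full; the proofs are below) =====
def Claim_equal_get_sector_classification : Prop := ∀ (symbol : String), Dom_get_sector_classification symbol → Spec_get_sector_classification symbol (get_sector_classification symbol)

-- ===== LEMMAS AND PROOFS =====

-- ===== VERDICT (by name: the statement is the Claim_ definition above) =====
-- first-match lookup in a flat association list, with default "Other"
def pvLookup (s : String) : List (String × String) → String
  | [] => "Other"
  | (k, v) :: rest => if s == k then v else pvLookup s rest

-- flattening one sector's symbol list into key/value pairs preserves the scan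
theorem pvLookup_sector (s sector : String) (syms : List String)
    (rest : List (String × String)) :
    pvLookup s (syms.map (fun x => (x, sector)) ++ rest)
      = if syms.contains s then sector else pvLookup s rest := by
  induction syms with
  | nil => simp
  | cons a as ih =>
    simp only [List.map_cons, List.cons_append, pvLookup, List.contains_cons, ih]
    by_cases h : (s == a) = true <;> simp [h]

-- A's sector-by-sector scan equals first-match lookup in the flattened table
theorem pvFindSector_eq_lookup (s : String) (L : List (String × List String)) :
    pvFindSector s L = pvLookup s (L.flatMap fun p => p.2.map (fun x => (x, p.1))) := by
  induction L with
  | nil => rfl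
  | cons p rest ih =>
    obtain ⟨sector, syms⟩ := p
    simp only [pvFindSector, List.flatMap_cons, pvLookup_sector, ih]

-- B's Dict lookup on an assoc list is the same first-match scan
theorem pvGetD_mk_eq_lookup (s : String) (ps : List (String × String)) :
    PySem.Dict.getD (PySem.Dict.mk ps) s "Other" = pvLookup s ps := by
  induction ps with
  | nil => rfl
  | cons p rest ih =>
    obtain ⟨k, v⟩ := p
    simp only [PySem.Dict.getD, PySem.Dict.get?_mk_cons] at *
    rw [show (k == s) = (s == k) from Bool.eq_iff_iff.mpr (by simp only [beq_iff_eq]; exact eq_comm)]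
    by_cases h : (s == k) = true <;> simp [pvLookup, h, ih]

-- the literal tables: B's flat table is exactly A's table flattened
theorem pvTable_flatten :
    (pvSectorsA.flatMap fun p => p.2.map (fun x => (x, p.1))) = pvSectorTable := rfl

theorem get_sector_classification_spec : Claim_equal_get_sector_classification := by
  intro symbol _
  unfold Spec_get_sector_classification get_sector_classification get_sector_classification_alt
  rw [pvFindSector_eq_lookup, pvTable_flatten]
  exact (pvGetD_mk_eq_lookup symbol pvSectorTable).symm
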